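-- pv_equiv track=rewrite | github.com/IcarPA-TBlab/nrc | src/python/seqLib.py | findKmers
-- ===== SOURCE A (Python) =====
-- def findKmers(sequenza, K):
--     """
--     trova i k meri considerando anche le espansioni
--     """
--     sost={ "r":["g", "a"] , "y":["t","c"], "k":["g", "t"], "m":["a", "c"], "s":["g", "c"], "w":["a", "t"], "b":["g", "t", "c"], "d":["g", "a", "t"], "h":["a", "c", "t"], "v":["g", "c", "a"], "n":["a", "g", "c", "t"]}
--     end=len(sequenza)
--     out=[]
--     for i in range(end-K+1):
--         kmer=sequenza[i:i+K]  # sequenza candidata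
--         temp=[]
--         for k in kmer:
--             if k in sost.keys():
--                 temp.append(sost[k])
--
--             else:
--                 temp.append([k])
--         out.append(temp) # out e' la lista impacchettata
--     out2=[]
--     for o in out:
--         temp=o[0]
--         for i in range(1,len(o)):
--             temp=[t+l for t in temp for l in o[i]]
--         out2.extend(temp)
--     return out2
-- ===== SOURCE B (Python) =====
-- def findKmers(sequenza, K):
--     """trova i k meri considerando anche le espansioni (one pass, recursive product)"""
--     sost = {"r": ["g", "a"], "y": ["t", "c"], "k": ["g", "t"], "m": ["a", "c"],
--             "s": ["g", "c"], "w": ["a", "t"], "b": ["g", "t", "c"], "d": ["g", "a", "t"],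
--             "h": ["a", "c", "t"], "v": ["g", "c", "a"], "n": ["a", "g", "c", "t"]}
--
--     def expand(opts):
--         if len(opts) == 1:
--             return opts[0]
--         return [x + t for x in opts[0] for t in expand(opts[1:])]
--
--     result = []
--     for i in range(len(sequenza) - K + 1):
--         opts = [sost[c] if c in sost else [c] for c in sequenza[i:i + K]]
--         result.extend(expand(opts))
--     return result
-- ===== Notes on version B (the rewrite author's own statement) =====
-- stated objective: idiomatic
-- what changed: B merges A's two shaped passes (build packed list 'out', then re-walk it with an indexed left-fold product) into a single loop per window that maps each character to its options and expands them with a recursive cartesian product, extending the flat result directly.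
import Mathlib
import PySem

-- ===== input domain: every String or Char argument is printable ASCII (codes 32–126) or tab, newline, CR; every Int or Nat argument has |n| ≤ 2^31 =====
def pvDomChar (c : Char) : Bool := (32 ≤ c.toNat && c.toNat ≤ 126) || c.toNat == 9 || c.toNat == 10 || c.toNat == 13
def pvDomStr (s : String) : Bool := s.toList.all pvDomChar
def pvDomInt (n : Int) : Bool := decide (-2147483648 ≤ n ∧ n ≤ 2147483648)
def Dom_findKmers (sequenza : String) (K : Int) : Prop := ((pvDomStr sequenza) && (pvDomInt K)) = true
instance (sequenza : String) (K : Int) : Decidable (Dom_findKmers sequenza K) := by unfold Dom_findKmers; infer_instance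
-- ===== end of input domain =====

-- B merges A's two shaped passes into one loop per window and computes each window's
-- cartesian product by structural recursion instead of A's packed-list + indexed left fold (objective: idiomatic).


-- ===== PORT A =====
-- the literal dict sost (keys/values are 1-char Python strings, modelled on the List Char side as PYSEM.md directs)
def pvSost : PySem.Dict Char (List (List Char)) := PySem.Dict.ofList
  [('r', [['g'], ['a']]), ('y', [['t'], ['c']]), ('k', [['g'], ['t']]), ('m', [['a'], ['c']]),
   ('s', [['g'], ['c']]), ('w', [['a'], ['t']]), ('b', [['g'], ['t'], ['c']]),
   ('d', [['g'], ['a'], ['t']]), ('h', [['a'], ['c'], ['t']]), ('v', [['g'], ['c'], ['a']]),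
   ('n', [['a'], ['g'], ['c'], ['t']])]

-- temp=[t+l for t in temp for l in o[i]]
def pvMul (temp l : List (List Char)) : List (List Char) :=
  temp.flatMap (fun t => l.map (fun x => t ++ x))

def findKmers (sequenza : String) (K : Int) : List String :=
  let s := sequenza.toList
  let endI : Int := s.length
  -- first pass: out, the packed list
  let out : List (List (List (List Char))) :=
    (PySem.List.pyRange 0 (endI - K + 1) 1).foldl (fun out i =>
      let kmer := PySem.List.slice s (some i) (some (i + K))
      let temp := kmer.foldl (fun temp k =>
        match PySem.Dict.get? pvSost k with
        | some v => temp ++ [v]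
        | none => temp ++ [[[k]]]) []
      out ++ [temp]) []
  -- second pass: out2
  let out2 : List (List Char) :=
    out.foldl (fun out2 o =>
      let temp := (PySem.List.pyRange 1 (o.length : Int) 1).foldl
        (fun temp i => pvMul temp (PySem.List.pyGetD o i []))
        (PySem.List.pyGetD o 0 [])   -- o[0]: IndexError when o = [] (K ≤ 0), excluded by Pre_
      out2 ++ temp) []
  out2.map String.ofList

-- ===== PORT B =====
-- recursive cartesian product; expand([]) is Python's IndexError (K ≤ 0), excluded by Pre_
def pvExpand : List (List (List Char)) → List (List Char)
  | [] => []
  | [o] => o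
  | o :: os => o.flatMap (fun x => (pvExpand os).map (fun t => x ++ t))

def findKmers_alt (sequenza : String) (K : Int) : List String :=
  let s := sequenza.toList
  ((PySem.List.pyRange 0 ((s.length : Int) - K + 1) 1).foldl (fun result i =>
    let opts := (PySem.List.slice s (some i) (some (i + K))).map (fun c =>
      match PySem.Dict.get? pvSost c with
      | some v => v
      | none => [[c]])
    result ++ pvExpand opts) []).map String.ofList

-- ===== PRECONDITION & SPEC =====
-- Pre_ excludes K ≤ 0, where both A and B raise IndexError (o[0] / opts[0] on an empty window).
def Pre_findKmers (sequenza : String) (K : Int) : Prop := 1 ≤ K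
instance (sequenza : String) (K : Int) : Decidable (Pre_findKmers sequenza K) := by unfold Pre_findKmers; infer_instance
def pvWitness_findKmers : String × Int := ("acgtn", 3)
def Spec_findKmers (sequenza : String) (K : Int) (out : List String) : Prop := out = findKmers_alt sequenza K
instance (sequenza : String) (K : Int) (out : List String) : Decidable (Spec_findKmers sequenza K out) := by unfold Spec_findKmers; infer_instance

-- ===== CLAIM (what is proved, stated in full; the proofs are below) =====
def Claim_equal_findKmers : Prop := ∀ (sequenza : String) (K : Int), Dom_findKmers sequenza K → Pre_findKmers sequenza K → Spec_findKmers sequenza K (findKmers sequenza K)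

-- ===== LEMMAS AND PROOFS =====

theorem pvMul_assoc (a b c : List (List Char)) : pvMul (pvMul a b) c = pvMul a (pvMul b c) := by
  simp only [pvMul, List.flatMap_assoc]
  congr 1
  funext t
  simp [List.flatMap_map, List.map_flatMap, List.map_map, Function.comp_def, List.append_assoc]

theorem pvExpand_cons_cons (x y : List (List Char)) (os : List (List (List Char))) :
    pvExpand (x :: y :: os) = pvMul x (pvExpand (y :: os)) := rfl

theorem pvExpand_mul_cons (os : List (List (List Char))) (a b : List (List Char)) :
    pvExpand (pvMul a b :: os) = pvMul a (pvExpand (b :: os)) := by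
  induction os generalizing b with
  | nil => rfl
  | cons c os ih =>
    rw [pvExpand_cons_cons, pvExpand_cons_cons, pvMul_assoc]

theorem foldl_pvMul_eq_expand (os : List (List (List Char))) (x : List (List Char)) :
    os.foldl pvMul x = pvExpand (x :: os) := by
  induction os generalizing x with
  | nil => rfl
  | cons y os ih => rw [List.foldl_cons, ih, pvExpand_mul_cons, ← pvExpand_cons_cons]

-- out.append(f(x)) loop is map
theorem foldl_append_singleton {α β : Type} (l : List α) (f : α → β) (acc : List β) :
    l.foldl (fun acc x => acc ++ [f x]) acc = acc ++ l.map f := by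
  induction l generalizing acc with
  | nil => simp
  | cons x l ih => simp [ih]

-- A's per-window char loop ('temp.append(...)') is a map
theorem tempA_eq_map (l : List Char) (acc : List (List (List Char))) :
    l.foldl (fun temp k =>
        match PySem.Dict.get? pvSost k with
        | some v => temp ++ [v]
        | none => temp ++ [[[k]]]) acc
      = acc ++ l.map (fun c =>
        match PySem.Dict.get? pvSost c with
        | some v => v
        | none => [[c]]) := by
  induction l generalizing acc with
  | nil => simp
  | cons c l ih =>
    simp only [List.foldl_cons, List.map_cons]
    cases PySem.Dict.get? pvSost c <;> simp [ih]

-- A's inner indexed fold equals a fold over the tail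
theorem innerA_eq_expand (o : List (List (List Char))) :
    (PySem.List.pyRange 1 (o.length : Int) 1).foldl
      (fun temp i => pvMul temp (PySem.List.pyGetD o i []))
      (PySem.List.pyGetD o 0 []) = pvExpand o := by
  have h := PySem.List.foldl_pyRange_pyGetD' (xs := o) (f := pvMul) (d := [])
      (a := 1) (init := PySem.List.pyGetD o 0 []) (by norm_num)
  rw [h]
  cases o with
  | nil => rfl
  | cons x os =>
    have h0 : PySem.List.pyGetD (x :: os) (0 : Int) [] = x := by
      simp
    simp only [Int.toNat_one, List.drop_succ_cons, List.drop_zero, h0]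
    exact foldl_pvMul_eq_expand os x

-- ===== VERDICT (by name: the statement is the Claim_ definition above) =====
theorem findKmers_spec : Claim_equal_findKmers := by
  intro sequenza K _ _
  unfold Spec_findKmers findKmers findKmers_alt
  simp only
  rw [foldl_append_singleton]
  simp only [List.nil_append]
  rw [List.foldl_map]
  congr 1
  apply List.foldl_ext
  intro out2 i _
  rw [innerA_eq_expand]
  congr 1
  rw [tempA_eq_map]
  simp only [List.nil_append]
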